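-- pv_equiv track=rewrite | github.com/d9nchik/maxKr2 | sorts.py | get_ideal_division
-- ===== SOURCE A (Python) =====
-- def fibonacci_n(n: int):
--     """
--     Fibonacci n-order
--
--     :param n: order
--     :return: function that calculates fibonacci of order n of x argument
--     """
--     array = []
--     for x in range(n):
--         array.append(0)
--     array.append(1)
--
--     def fibonacci(number: int):
--         """
--         fibonacci
--
--         :param number: n member
--         :return: result of function in this point
--         """
--         try:
--             return array[number - 1]
--         except IndexError:
--             sum = 0
--             for x in range(number - n - 1, number):
--                 sum += fibonacci(x)
--             array.append(sum)
--             return sum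
--
--     return fibonacci
--
-- def get_ideal_division(n: int, depth: int = 10):
--     """
--     Get ideal division - useful for Multiphase sorting
--
--     :param n: number of files
--     :param depth: which depth you want to have
--     :return: matrix of size n by depth
--     """
--     fibonacci = fibonacci_n(n - 1)
--
--     # formula for getting  a_k(L)
--     def get_a(k: int, L: int):
--         """
--         get_a
--
--         :param k: number of row (starting from 1)
--         :param L: number of column (starting from 0)
--         :return: value a of to order k
--         """
--         sum = 0
--         for fibonacci_index in range(max(L + k - 1, 0), L + n):
--             sum += fibonacci(fibonacci_index)
--         return sum
--
--     # printing table
--     ideal_division = []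
--     for x in range(depth):
--         ideal_row_division = []
--         for y in range(n):
--             ideal_row_division.append(get_a(y + 1, x))
--         ideal_division.append(ideal_row_division)
--     return ideal_division
-- ===== SOURCE B (Python) =====
-- def get_ideal_division(n: int, depth: int = 10):
--     """Ideal polyphase (Fibonacci) distribution: precompute the order-n
--     Fibonacci sequence once with a sliding-window sum, take prefix sums,
--     and read every cell off as an O(1) range-sum difference."""
--     if n <= 0:
--         return [[] for _ in range(depth)]
--     fib = [1] + [0] * (n - 1)
--     window = 1  # sum of the last n entries of fib
--     for i in range(n, depth + n - 1):
--         v = window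
--         fib.append(v)
--         window += v - fib[i - n]
--     prefix = [0]
--     for v in fib:
--         prefix.append(prefix[-1] + v)
--     return [[prefix[x + n] - prefix[x + y] for y in range(n)]
--             for x in range(depth)]
-- ===== Notes on version B (the rewrite author's own statement) =====
-- stated objective: faster
-- what changed: A recomputes each cell by a fresh summation loop over a memoized recursive Fibonacci closure (O(depth*n^2) plus cache machinery); B precomputes the order-n Fibonacci sequence once with a sliding-window sum, takes prefix sums, and reads every cell off as an O(1) range-sum difference.
import Mathlib
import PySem

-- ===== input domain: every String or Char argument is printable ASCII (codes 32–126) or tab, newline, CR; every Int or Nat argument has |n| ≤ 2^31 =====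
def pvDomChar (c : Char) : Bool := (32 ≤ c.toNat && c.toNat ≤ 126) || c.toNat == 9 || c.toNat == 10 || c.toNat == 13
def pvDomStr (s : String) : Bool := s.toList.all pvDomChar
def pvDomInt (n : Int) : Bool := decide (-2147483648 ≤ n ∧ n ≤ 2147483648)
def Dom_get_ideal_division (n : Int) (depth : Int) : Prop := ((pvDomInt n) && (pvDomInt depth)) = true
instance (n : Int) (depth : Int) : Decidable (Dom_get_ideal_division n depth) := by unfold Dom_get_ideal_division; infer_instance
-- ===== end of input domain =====

-- B replaces A's memoized-recursion-per-cell (O(depth·n²)) by one precomputed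
-- Fibonacci list with prefix sums, each cell an O(1) range-sum difference.


-- ===== PORT A =====
-- A's inner closure `fibonacci`: memoized recursion over a threaded cache list.
-- `fuel` only makes the Lean recursion total; the supplied fuel is never exhausted
-- on the calls A actually makes.
def pvFibA (m : Int) : Nat → Int → List Int → Int × List Int
  | 0, _, array => (0, array)
  | fuel+1, number, array =>
    match PySem.List.pyGet? array (number - 1) with
    | some v => (v, array)
    | none =>
      let p := (PySem.List.pyRange (number - m - 1) number 1).foldl
        (fun (p : Int × List Int) x =>
          let q := pvFibA m fuel x p.2
          (p.1 + q.1, q.2)) (0, array)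
      (p.1, p.2 ++ [p.1])

-- A's inner `get_a`
def pvGetA (m n k L : Int) (array : List Int) : Int × List Int :=
  (PySem.List.pyRange (max (L + k - 1) 0) (L + n) 1).foldl
    (fun (p : Int × List Int) idx =>
      let q := pvFibA m (idx.toNat + 1) idx p.2
      (p.1 + q.1, q.2)) (0, array)

def get_ideal_division (n : Int) (depth : Int) : List (List Int) :=
  let m := n - 1
  let array0 : List Int :=
    (PySem.List.pyRange 0 m 1).foldl (fun a _ => a ++ [(0 : Int)]) [] ++ [1]
  ((PySem.List.pyRange 0 depth 1).foldl
    (fun (p : List (List Int) × List Int) x =>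
      let q := (PySem.List.pyRange 0 n 1).foldl
        (fun (r : List Int × List Int) y =>
          let s := pvGetA m n (y + 1) x r.2
          (r.1 ++ [s.1], s.2)) ([], p.2)
      (p.1 ++ [q.1], q.2)) ([], array0)).1

-- ===== PORT B =====
def get_ideal_division_alt (n : Int) (depth : Int) : List (List Int) :=
  if n ≤ 0 then
    (PySem.List.pyRange 0 depth 1).map (fun _ => ([] : List Int))
  else
    let fib0 : List Int := 1 :: List.replicate (n - 1).toNat 0
    let st := (PySem.List.pyRange n (depth + n - 1) 1).foldl
      (fun (st : List Int × Int) i =>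
        let v := st.2
        let fib := st.1 ++ [v]
        (fib, st.2 + v - PySem.List.pyGetD fib (i - n) 0)) (fib0, 1)
    let pref := st.1.foldl
      (fun (acc : List Int) v => acc ++ [PySem.List.pyGetD acc (-1) 0 + v]) [0]
    (PySem.List.pyRange 0 depth 1).map (fun x =>
      (PySem.List.pyRange 0 n 1).map (fun y =>
        PySem.List.pyGetD pref (x + n) 0 - PySem.List.pyGetD pref (x + y) 0))

-- ===== PRECONDITION & SPEC =====
def Spec_get_ideal_division (n : Int) (depth : Int) (out : List (List Int)) : Prop := out = get_ideal_division_alt n depth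
instance (n : Int) (depth : Int) (out : List (List Int)) : Decidable (Spec_get_ideal_division n depth out) := by unfold Spec_get_ideal_division; infer_instance

-- ===== CLAIM (what is proved, stated in full; the proofs are below) =====
def Claim_equal_get_ideal_division : Prop := ∀ (n : Int) (depth : Int), Dom_get_ideal_division n depth → Spec_get_ideal_division n depth (get_ideal_division n depth)

-- ===== LEMMAS AND PROOFS =====

-- n-order Fibonacci sequence both programs compute: gF n 0 = 1, gF n i = 0 for
-- 1 ≤ i < n, and gF n i = sum of the previous n terms for i ≥ n.
def gF (n : Nat) (i : Nat) : Int :=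
  if i = 0 then 1
  else if i < n then 0
  else ((List.range n).attach.map (fun j => gF n (i - n + j.1))).sum
termination_by i
decreasing_by
  have := j.2
  simp only [List.mem_range] at this
  omega

theorem gF_zero (n : Nat) : gF n 0 = 1 := by rw [gF]; simp

theorem gF_small (n i : Nat) (h1 : 1 ≤ i) (h2 : i < n) : gF n i = 0 := by
  rw [gF]; simp [Nat.ne_of_gt h1, h2]

theorem gF_rec (n i : Nat) (h1 : n ≤ i) (h2 : 1 ≤ i) :
    gF n i = ((List.range n).map (fun j => gF n (i - n + j))).sum := by
  rw [gF]
  simp only [Nat.ne_of_gt h2, if_neg (Nat.not_lt.mpr h1), if_false]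
  simp

-- prefix sums of gF
def Sg (n j : Nat) : Int := ((List.range j).map (gF n)).sum

theorem Sg_succ (n j : Nat) : Sg n (j+1) = Sg n j + gF n j := by
  simp [Sg, List.range_succ]

theorem sum_shift (n a k : Nat) :
    ((List.range k).map (fun j => gF n (a + j))).sum = Sg n (a + k) - Sg n a := by
  induction k with
  | zero => simp
  | succ k ih => rw [List.range_succ]; simp only [List.map_append, List.sum_append, ih, List.map_cons,
      List.map_nil, List.sum_cons, List.sum_nil, show a + (k+1) = (a+k)+1 from rfl, Sg_succ]; ring

theorem gF_rec' (n i : Nat) (h1 : n ≤ i) (h2 : 1 ≤ i) :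
    gF n i = Sg n i - Sg n (i - n) := by
  rw [gF_rec n i h1 h2]
  have := sum_shift n (i - n) n
  rw [Nat.sub_add_cancel h1] at this
  rw [show (fun j => gF n (i - n + j)) = (fun j => gF n ((i - n) + j)) from rfl, this]

theorem Sg_one_ge (n j : Nat) (h1 : 1 ≤ j) (h2 : j ≤ n) : Sg n j = 1 := by
  induction j with
  | zero => omega
  | succ j ih =>
    rcases Nat.eq_zero_or_pos j with h | h
    · subst h; simp [Sg, gF_zero]
    · rw [Sg_succ, ih h (by omega), gF_small n j h (by omega)]; ring

theorem gF_full (n : Nat) (h : 1 ≤ n) : gF n n = 1 := by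
  rw [gF_rec' n n (le_refl n) h, Nat.sub_self]
  rw [Sg_one_ge n n h (le_refl n)]
  simp [Sg]

-- the memo cache: first len values gF n 1 .. gF n len
def fibArr (n len : Nat) : List Int := (List.range len).map (fun i => gF n (i+1))

theorem fibArr_succ (n L : Nat) : fibArr n (L+1) = fibArr n L ++ [gF n (L+1)] := by
  simp [fibArr, List.range_succ]

-- value of cell (x, y) of the table
def rowval (n x y : Nat) : Int := Sg n (x + n) - Sg n (x + y)

-- folding A's fibonacci over a consecutive range of indices ≥ 1
theorem fibA_fold (n : Nat) (hn : 1 ≤ n) (phi : Int → Nat)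
    (H : ∀ (number : Int) (len : Nat), n ≤ len → 1 ≤ number → number.toNat + 1 ≤ phi number →
      pvFibA ((n:Int)-1) (phi number) number (fibArr n len)
        = (gF n number.toNat, fibArr n (max len number.toNat))) :
    ∀ (k : Nat) (a b s : Int) (len : Nat), b - a = (k:Int) → n ≤ len → 1 ≤ a →
      (∀ x : Int, a ≤ x → x < b → x.toNat + 1 ≤ phi x) →
      (PySem.List.pyRange a b 1).foldl
        (fun (p : Int × List Int) x =>
          (p.1 + (pvFibA ((n:Int)-1) (phi x) x p.2).1,
           (pvFibA ((n:Int)-1) (phi x) x p.2).2)) (s, fibArr n len)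
      = (s + ((List.range k).map (fun j : Nat => gF n (a + (j:Int)).toNat)).sum,
         fibArr n (if k = 0 then len else max len (b - 1).toNat)) := by
  intro k
  induction k with
  | zero =>
    intro a b s len hk hlen ha hphi
    rw [PySem.List.pyRange_one_eq_nil (by omega)]
    simp
  | succ k ih =>
    intro a b s len hk hlen ha hphi
    conv_lhs => rw [show b = b - 1 + 1 by ring]
    rw [PySem.List.pyRange_one_succ_right (by omega : a ≤ b - 1), List.foldl_append]
    rw [ih a (b-1) s len (by omega) hlen ha (fun x h1 h2 => hphi x h1 (by omega))]
    simp only [List.foldl_cons, List.foldl_nil]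
    have hL' : n ≤ (if k = 0 then len else max len (b - 1 - 1).toNat) := by split <;> omega
    rw [H (b-1) _ hL' (by omega) (hphi (b-1) (by omega) (by omega))]
    simp only [Prod.mk.injEq]
    constructor
    · rw [List.range_succ]
      simp only [List.map_append, List.sum_append, List.map_cons, List.map_nil,
        List.sum_cons, List.sum_nil]
      have : a + (k:Int) = b - 1 := by omega
      rw [this]
      ring
    · have : (max (if k = 0 then len else max len (b - 1 - 1).toNat) (b-1).toNat)
          = max len (b-1).toNat := by split <;> omega
      rw [this]
      simp

-- A's fibonacci closure computes gF and extends the cache to the index it was asked for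
theorem pvFibA_spec (n : Nat) (hn : 1 ≤ n) :
    ∀ (fuel : Nat) (number : Int) (len : Nat), n ≤ len → 1 ≤ number → number.toNat + 1 ≤ fuel →
      pvFibA ((n:Int)-1) fuel number (fibArr n len)
        = (gF n number.toNat, fibArr n (max len number.toNat)) := by
  intro fuel
  induction fuel with
  | zero => intro number len _ h1 h2; omega
  | succ f ih =>
    intro number len hlen h1 hf
    simp only [pvFibA]
    by_cases hcase : number ≤ (len:Int)
    · -- cache hit
      have hidx : (0:Int) ≤ number - 1 := by omega
      rw [PySem.List.pyGet?_of_nonneg _ hidx]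
      have hlt : (number - 1).toNat < (fibArr n len).length := by
        simp [fibArr]; omega
      rw [List.getElem?_eq_getElem hlt]
      simp only [fibArr, List.getElem_map, List.getElem_range]
      have : (number - 1).toNat + 1 = number.toNat := by omega
      rw [this]
      have : max len number.toNat = len := by omega
      rw [this]
    · -- cache miss: compute the previous n values, append their sum
      have hnone : PySem.List.pyGet? (fibArr n len) (number - 1) = none := by
        rw [PySem.List.pyGet?_eq_none_iff]
        intro hr
        rcases hr with ⟨_, h2⟩
        simp [fibArr] at h2
        omega
      rw [hnone]
      dsimp only
      rw [fibA_fold n hn (fun _ => f) (fun nb ln a1 a2 a3 => ih nb ln a1 a2 a3) n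
        (number - (↑n - 1) - 1) number 0 len (by push_cast; ring) hlen (by omega)
        (fun x hx1 hx2 => by show x.toNat + 1 ≤ f; omega)]
      have hne : ¬ (n = 0) := by omega
      simp only [if_neg hne, Prod.mk.injEq]
      have hmax : max len (number - 1).toNat = (number - 1).toNat := by omega
      rw [hmax]
      have hsum : ((List.range n).map (fun j : Nat => gF n (number - (↑n - 1) - 1 + (j:Int)).toNat)).sum
          = gF n number.toNat := by
        rw [gF_rec n number.toNat (by omega) (by omega)]
        congr 1
        apply List.map_congr_left
        intro j hj
        simp only [List.mem_range] at hj
        congr 1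
        omega
      constructor
      · rw [hsum]; ring
      · rw [hsum, zero_add]
        have e1 : (number - 1).toNat + 1 = number.toNat := by omega
        have e2 : max len number.toNat = number.toNat := by omega
        rw [e2, ← e1, ← fibArr_succ]


-- one cell of the table: get_a(y+1, x) sums gF over [x+y, x+n)
theorem pvGetA_spec (n : Nat) (hn : 1 ≤ n) (x y len : Nat) (hy : y < n) (hlen : n ≤ len)
    (hsp : x + y = 0 → len = n) :
    pvGetA ((n:Int)-1) (n:Int) ((y:Int)+1) (x:Int) (fibArr n len)
      = (rowval n x y, fibArr n (max len (x + n - 1))) := by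
  unfold pvGetA
  have hmax : max ((x:Int) + ((y:Int)+1) - 1) 0 = ((x+y : Nat) : Int) := by push_cast; omega
  rw [hmax]
  dsimp only
  by_cases h0 : x + y = 0
  · -- the very first cell: index 0 read from the pristine cache (negative-index hit)
    have hx : x = 0 := by omega
    have hy0 : y = 0 := by omega
    subst hx; subst hy0
    rw [hsp h0]
    push_cast
    simp only [zero_add]
    rw [PySem.List.pyRange_one_cons (by exact_mod_cast hn)]
    simp only [List.foldl_cons]
    have hfirst : pvFibA ((n:Int)-1) ((0:Int).toNat + 1) 0 (fibArr n n) = (1, fibArr n n) := by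
      simp only [pvFibA, Int.toNat_zero]
      rw [show (0 : Int) - 1 = -1 by ring, PySem.List.pyGet?_neg_one]
      rw [List.getLast?_eq_getElem?]
      have hlt : n - 1 < (fibArr n n).length := by simp [fibArr]; omega
      rw [show (fibArr n n).length - 1 = n - 1 by simp [fibArr]]
      rw [List.getElem?_eq_getElem hlt]
      simp only [fibArr, List.getElem_map, List.getElem_range]
      rw [show n - 1 + 1 = n by omega, gF_full n hn]
    rw [hfirst]
    dsimp only
    rw [show (0:Int) + 1 = 1 by norm_num]
    rw [fibA_fold n hn (fun idx => idx.toNat + 1) (fun nb ln a1 a2 a3 => pvFibA_spec n hn _ nb ln a1 a2 a3)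
      (n-1) 1 (n:Int) 1 n (by omega) (le_refl n) (by omega)
      (fun z h1 h2 => le_refl _)]
    have hsum : ((List.range (n-1)).map (fun j : Nat => gF n ((1:Int) + (j:Int)).toNat)).sum
        = Sg n n - 1 := by
      rw [show ((List.range (n-1)).map (fun j : Nat => gF n ((1:Int) + (j:Int)).toNat))
          = ((List.range (n-1)).map (fun j : Nat => gF n (1 + j))) from
        List.map_congr_left (fun j hj => by
          have hh : ((1:Int) + (j:Int)).toNat = 1 + j := by omega
          rw [hh])]
      rw [sum_shift n 1 (n-1), show 1 + (n-1) = n by omega, Sg_one_ge n 1 (le_refl 1) hn]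
    rw [hsum]
    simp only [Prod.mk.injEq]
    constructor
    · simp [rowval, Sg]
    · have : (if n - 1 = 0 then n else max n ((n:Int) - 1).toNat) = max n (0 + n - 1) := by
        split <;> omega
      rw [this]
      congr 1
      omega
  · -- every other cell: all indices ≥ 1
    rw [fibA_fold n hn (fun idx => idx.toNat + 1) (fun nb ln a1 a2 a3 => pvFibA_spec n hn _ nb ln a1 a2 a3)
      (n-y) ((x+y : Nat) : Int) ((x:Int) + (n:Int)) 0 len (by omega) hlen (by omega)
      (fun z h1 h2 => le_refl _)]
    have hk0 : ¬ (n - y = 0) := by omega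
    simp only [if_neg hk0, Prod.mk.injEq]
    constructor
    · rw [show ((List.range (n-y)).map (fun j : Nat => gF n (((x+y:Nat):Int) + (j:Int)).toNat))
          = ((List.range (n-y)).map (fun j : Nat => gF n ((x+y) + j))) from
        List.map_congr_left (fun j hj => by
          have hh : ((((x+y : Nat)):Int) + (j:Int)).toNat = (x+y) + j := by omega
          rw [hh])]
      rw [sum_shift n (x+y) (n-y), show x + y + (n-y) = x + n by omega]
      simp [rowval]
    · congr 1
      omega

-- a fold over cells that leave the cache unchanged appends one value per cell
theorem foldl_row_const (n x : Nat) (arr : List Int) (f : Int → Int) :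
    ∀ (l : List Int), (∀ y ∈ l, pvGetA ((n:Int)-1) (n:Int) (y+1) ((x:Nat):Int) arr = (f y, arr)) →
    ∀ (acc : List Int),
      l.foldl (fun (r : List Int × List Int) y =>
        (r.1 ++ [(pvGetA ((n:Int)-1) (n:Int) (y+1) ((x:Nat):Int) r.2).1],
         (pvGetA ((n:Int)-1) (n:Int) (y+1) ((x:Nat):Int) r.2).2)) (acc, arr)
      = (acc ++ l.map f, arr) := by
  intro l
  induction l with
  | nil => intro _ acc; simp
  | cons z l ih =>
    intro h acc
    simp only [List.foldl_cons, List.map_cons]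
    rw [h z (by simp)]
    rw [ih (fun y hy => h y (by simp [hy])) (acc ++ [f z])]
    simp

-- one row of the table
theorem row_spec (n : Nat) (hn : 1 ≤ n) (x len : Nat) (hlen : n ≤ len) (hsp : x = 0 → len = n) :
    (PySem.List.pyRange 0 (n:Int) 1).foldl
      (fun (r : List Int × List Int) y =>
        (r.1 ++ [(pvGetA ((n:Int)-1) (n:Int) (y+1) ((x:Nat):Int) r.2).1],
         (pvGetA ((n:Int)-1) (n:Int) (y+1) ((x:Nat):Int) r.2).2)) ([], fibArr n len)
    = ((List.range n).map (fun y => rowval n x y), fibArr n (max len (x + n - 1))) := by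
  rw [PySem.List.pyRange_one_cons (by exact_mod_cast hn)]
  simp only [List.foldl_cons]
  have hcell0 := pvGetA_spec n hn x 0 len (by omega) hlen (by intro h; exact hsp (by omega))
  rw [show ((0:Nat):Int) + 1 = 0 + 1 by norm_num] at hcell0
  rw [hcell0]
  rw [show (0:Int) + 1 = 1 by norm_num]
  have hrest := foldl_row_const n x
    (fibArr n (max len (x + n - 1)))
    (fun y => rowval n x y.toNat)
    (PySem.List.pyRange 1 (n:Int))
    (by
      intro y hy
      rw [PySem.List.mem_pyRange_one] at hy
      have hy1 : (y.toNat : Int) = y := by omega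
      have hc := pvGetA_spec n hn x y.toNat (max len (x + n - 1)) (by omega) (by omega)
        (by intro h; omega)
      rw [hy1] at hc
      rw [hc]
      have : max (max len (x + n - 1)) (x + n - 1) = max len (x + n - 1) := by omega
      rw [this])
    ([] ++ [rowval n x 0])
  rw [hrest]
  simp only [Prod.mk.injEq]
  constructor
  · rw [PySem.List.pyRange_one, List.map_map]
    rw [show ((n:Int) - 1).toNat = n - 1 by omega]
    rw [show n = (n - 1) + 1 by omega, List.range_succ_eq_map]
    simp only [List.map_cons, List.map_map, List.nil_append, List.cons_append]
    congr 1
    apply List.map_congr_left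
    intro j hj
    simp only [Function.comp_apply]
    congr 1
    omega
  · trivial

-- the whole table on the A side
theorem table_spec (n : Nat) (hn : 1 ≤ n) : ∀ (d : Nat),
    (PySem.List.pyRange 0 (d:Int) 1).foldl
      (fun (p : List (List Int) × List Int) x =>
        (p.1 ++ [((PySem.List.pyRange 0 (n:Int) 1).foldl
          (fun (r : List Int × List Int) y =>
            (r.1 ++ [(pvGetA ((n:Int)-1) (n:Int) (y+1) x r.2).1],
             (pvGetA ((n:Int)-1) (n:Int) (y+1) x r.2).2)) ([], p.2)).1],
         ((PySem.List.pyRange 0 (n:Int) 1).foldl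
          (fun (r : List Int × List Int) y =>
            (r.1 ++ [(pvGetA ((n:Int)-1) (n:Int) (y+1) x r.2).1],
             (pvGetA ((n:Int)-1) (n:Int) (y+1) x r.2).2)) ([], p.2)).2)) ([], fibArr n n)
    = ((List.range d).map (fun x => (List.range n).map (fun y => rowval n x y)),
       fibArr n (max n (d + n - 2))) := by
  intro d
  induction d with
  | zero =>
    rw [show ((0:Nat):Int) = 0 by norm_num, PySem.List.pyRange_one_eq_nil (le_refl 0)]
    simp only [List.foldl_nil, List.range_zero, List.map_nil]
    have : max n (0 + n - 2) = n := by omega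
    rw [this]
  | succ d ih =>
    rw [show (((d+1:Nat)):Int) = (d:Int) + 1 by push_cast; ring]
    rw [PySem.List.pyRange_one_succ_right (by omega : (0:Int) ≤ (d:Int)), List.foldl_append]
    rw [ih]
    simp only [List.foldl_cons, List.foldl_nil]
    rw [row_spec n hn d (max n (d + n - 2)) (by omega) (by intro h; omega)]
    simp only [Prod.mk.injEq]
    constructor
    · rw [List.range_succ]
      simp
    · congr 1
      omega

-- initial caches of both sides as explicit lists
theorem gF_list_init (n : Nat) (hn : 1 ≤ n) :
    (List.range n).map (gF n) = (1 : Int) :: List.replicate (n-1) 0 := by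
  apply List.ext_getElem
  · simp; omega
  · intro i h1 h2
    simp only [List.getElem_map, List.getElem_range]
    rcases Nat.eq_zero_or_pos i with h | h
    · subst h; simp [gF_zero]
    · rw [gF_small n i h (by simp at h1; omega)]
      rw [List.getElem_cons]
      simp [Nat.ne_of_gt h]

theorem fibArr_init (n : Nat) (hn : 1 ≤ n) :
    fibArr n n = List.replicate (n-1) 0 ++ [1] := by
  apply List.ext_getElem
  · simp [fibArr]; omega
  · intro i h1 h2
    simp only [fibArr, List.getElem_map, List.getElem_range]
    by_cases h : i < n - 1
    · rw [gF_small n (i+1) (by omega) (by omega)]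
      rw [List.getElem_append_left (by simpa using h)]
      simp
    · have hi : i = n - 1 := by simp [fibArr] at h1; omega
      subst hi
      rw [show n - 1 + 1 = n by omega, gF_full n hn]
      rw [List.getElem_append_right (by simp)]
      simp

theorem gF_window_step (n : Nat) (hn : 1 ≤ n) (t : Nat) :
    gF n (n+t+1) = gF n (n+t) + gF n (n+t) - gF n t := by
  have h1 := gF_rec' n (n+t+1) (by omega) (by omega)
  have h2 := gF_rec' n (n+t) (by omega) (by omega)
  rw [show n+t+1-n = t+1 by omega] at h1
  rw [show n+t-n = t by omega] at h2
  have h3 := Sg_succ n (n+t)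
  have h4 := Sg_succ n t
  omega

-- B's sliding-window loop extends the precomputed sequence
theorem bfib_loop (n : Nat) (hn : 1 ≤ n) (t : Nat) :
    (PySem.List.pyRange (n:Int) ((n:Int) + (t:Int)) 1).foldl
      (fun (st : List Int × Int) i =>
        (st.1 ++ [st.2],
         st.2 + st.2 - PySem.List.pyGetD (st.1 ++ [st.2]) (i - (n:Int)) 0))
      ((List.range n).map (gF n), gF n n)
    = ((List.range (n+t)).map (gF n), gF n (n+t)) := by
  induction t with
  | zero => rw [show ((n:Int) + ((0:Nat):Int)) = (n:Int) by norm_num,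
      PySem.List.pyRange_one_eq_nil (le_refl _)]; simp
  | succ t ih =>
    rw [show ((n:Int) + ((t+1:Nat):Int)) = ((n:Int) + (t:Nat)) + 1 by push_cast; ring]
    rw [PySem.List.pyRange_one_succ_right (by omega), List.foldl_append, ih]
    simp only [List.foldl_cons, List.foldl_nil]
    have hfib : (List.range (n+t)).map (gF n) ++ [gF n (n+t)] = (List.range (n+t+1)).map (gF n) := by
      rw [List.range_succ]; simp
    rw [hfib]
    have hidx : PySem.List.pyGetD ((List.range (n+t+1)).map (gF n)) ((n:Int) + (t:Int) - (n:Int)) 0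
        = gF n t := by
      rw [show (n:Int) + (t:Int) - (n:Int) = ((t:Nat):Int) by ring]
      rw [PySem.List.pyGetD_eq_getElem _ 0 (by omega) (by simp <;> omega)]
      simp only [Int.toNat_natCast, List.getElem_map, List.getElem_range]
    rw [hidx]
    show _ = ((List.range (n+t+1)).map (gF n), gF n (n+t+1))
    rw [gF_window_step n hn t]

-- the prefix-sum loop computes Sg
theorem pref_build (n : Nat) : ∀ (T : Nat),
    ((List.range T).map (gF n)).foldl
      (fun (acc : List Int) v => acc ++ [PySem.List.pyGetD acc (-1) 0 + v]) [0]
    = (List.range (T+1)).map (fun j => Sg n j) := by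
  intro T
  induction T with
  | zero => simp [Sg]
  | succ T ih =>
    rw [List.range_succ, List.map_append, List.foldl_append, ih]
    simp only [List.map_cons, List.map_nil, List.foldl_cons, List.foldl_nil]
    rw [show (List.range (T+1)).map (fun j => Sg n j)
        = (List.range T).map (fun j => Sg n j) ++ [Sg n T] by rw [List.range_succ]; simp]
    rw [PySem.List.pyGetD_neg_one_append_singleton]
    rw [List.range_succ, List.range_succ]
    simp [Sg_succ]

-- B computes the same table
theorem alt_eq (n : Nat) (hn : 1 ≤ n) (depth : Int) :
    get_ideal_division_alt (n:Int) depth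
      = (List.range depth.toNat).map (fun x => (List.range n).map (fun y => rowval n x y)) := by
  unfold get_ideal_division_alt
  rw [if_neg (by omega : ¬ (n:Int) ≤ 0)]
  dsimp only
  rw [show ((n:Int) - 1).toNat = n - 1 by omega]
  rw [show ((1:Int) :: List.replicate (n-1) 0) = (List.range n).map (gF n) from (gF_list_init n hn).symm]
  have hrange : PySem.List.pyRange (n:Int) (depth + (n:Int) - 1) 1
      = PySem.List.pyRange (n:Int) ((n:Int) + ((depth - 1).toNat : Int)) 1 := by
    rw [PySem.List.pyRange_one, PySem.List.pyRange_one]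
    have : (depth + (n:Int) - 1 - (n:Int)).toNat = ((n:Int) + (((depth - 1).toNat : Nat) : Int) - (n:Int)).toNat := by
      omega
    rw [this]
  rw [hrange]
  have hloop := bfib_loop n hn (depth - 1).toNat
  rw [gF_full n hn] at hloop
  rw [hloop]
  dsimp only
  rw [pref_build n (n + (depth - 1).toNat)]
  rw [PySem.List.pyRange_one 0 depth, List.map_map]
  simp only [sub_zero]
  apply List.map_congr_left
  intro k hk
  simp only [List.mem_range] at hk
  simp only [Function.comp_apply, zero_add]
  rw [PySem.List.pyRange_one 0 (n:Int), List.map_map]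
  rw [show ((n:Int) - 0).toNat = n by omega]
  apply List.map_congr_left
  intro y hy
  simp only [List.mem_range] at hy
  simp only [Function.comp_apply, zero_add]
  have hdep : (k:Int) < depth := by omega
  have hlen : (n + (depth - 1).toNat) + 1 = ((List.range (n + (depth - 1).toNat + 1)).map (fun j => Sg n j)).length := by
    simp
  have hup : PySem.List.pyGetD ((List.range (n + (depth - 1).toNat + 1)).map (fun j => Sg n j)) ((k:Int) + (n:Int)) 0
      = Sg n (k + n) := by
    rw [PySem.List.pyGetD_eq_getElem _ 0 (by omega) (by simp <;> omega)]
    simp only [List.getElem_map, List.getElem_range]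
    congr 1 <;> omega
  have hlo : PySem.List.pyGetD ((List.range (n + (depth - 1).toNat + 1)).map (fun j => Sg n j)) ((k:Int) + (y:Int)) 0
      = Sg n (k + y) := by
    rw [PySem.List.pyGetD_eq_getElem _ 0 (by omega) (by simp <;> omega)]
    simp only [List.getElem_map, List.getElem_range]
    congr 1 <;> omega
  rw [hup, hlo]
  rfl

-- A with n ≤ 0: every row is empty
theorem rows_nil_fold (arr : List Int) :
    ∀ (l : List Int) (acc : List (List Int)),
      l.foldl (fun (p : List (List Int) × List Int) _ => (p.1 ++ [([] : List Int)], p.2)) (acc, arr)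
      = (acc ++ l.map (fun _ => []), arr) := by
  intro l
  induction l with
  | nil => intro acc; simp
  | cons z l ih => intro acc; simp only [List.foldl_cons, List.map_cons]; rw [ih]; simp

theorem pyRange_zero_toNat (b : Int) :
    PySem.List.pyRange 0 b 1 = PySem.List.pyRange 0 ((b.toNat : Int)) 1 := by
  rw [PySem.List.pyRange_one, PySem.List.pyRange_one]
  have : (b - 0).toNat = (((b.toNat : Nat) : Int) - 0).toNat := by omega
  rw [this]

-- ===== VERDICT (by name: the statement is the Claim_ definition above) =====
theorem get_ideal_division_spec : Claim_equal_get_ideal_division := by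
  unfold Claim_equal_get_ideal_division
  intro n depth hdom
  unfold Spec_get_ideal_division
  by_cases hneg : n ≤ 0
  · -- n ≤ 0: no columns, every row is []
    unfold get_ideal_division get_ideal_division_alt
    rw [if_pos hneg]
    dsimp only
    rw [PySem.List.pyRange_one_eq_nil hneg]
    simp only [List.foldl_nil]
    rw [rows_nil_fold _ (PySem.List.pyRange 0 depth 1) []]
    simp
  · obtain ⟨m, rfl⟩ : ∃ m : Nat, n = (m:Int) := ⟨n.toNat, by omega⟩
    have hm : 1 ≤ m := by omega
    rw [alt_eq m hm depth]
    unfold get_ideal_division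
    dsimp only
    have harr : (PySem.List.pyRange 0 ((m:Int) - 1) 1).foldl
        (fun (a : List Int) _ => a ++ [(0:Int)]) [] ++ [1] = fibArr m m := by
      rw [PySem.List.foldl_append_singleton_eq_map]
      rw [fibArr_init m hm]
      simp only [List.nil_append]
      congr 1
      rw [List.map_const']
      rw [PySem.List.length_pyRange_one]
      congr 1
      omega
    rw [harr]
    rw [pyRange_zero_toNat depth]
    rw [table_spec m hm depth.toNat]
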